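-- pv_equiv track=rewrite | github.com/bharatagarwal/bctci | 30-sets-and-maps/30.04-multi-account-cheating.py | any_cheating_users
-- ===== SOURCE A (Python) =====
-- def any_cheating_users(ip_details):
-- 	if not ip_details:
-- 		return False
--
-- 	ip_sets = []
--
-- 	for user_tuple in ip_details:
-- 		ip_sets.append(set(user_tuple[1]))
--
-- 	for i in range(len(ip_sets)):
-- 		for j in range(i + 1, len(ip_sets)):
-- 			if ip_sets[i] == ip_sets[j]:
-- 				return True
--
-- 	return False
-- ===== SOURCE B (Python) =====
-- def any_cheating_users(ip_details):
--     seen = set()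
--     for _, ips in ip_details:
--         key = tuple(sorted(set(ips)))
--         if key in seen:
--             return True
--         seen.add(key)
--     return False
-- ===== Notes on version B (the rewrite author's own statement) =====
-- stated objective: alternative
-- what changed: Replaces the nested pairwise comparison of IP sets by a single pass that canonicalises each user's IPs to tuple(sorted(set(ips))) and looks each key up in a hash set of seen keys; it trades the quadratic pair scan for per-user key sorting.
import Mathlib
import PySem

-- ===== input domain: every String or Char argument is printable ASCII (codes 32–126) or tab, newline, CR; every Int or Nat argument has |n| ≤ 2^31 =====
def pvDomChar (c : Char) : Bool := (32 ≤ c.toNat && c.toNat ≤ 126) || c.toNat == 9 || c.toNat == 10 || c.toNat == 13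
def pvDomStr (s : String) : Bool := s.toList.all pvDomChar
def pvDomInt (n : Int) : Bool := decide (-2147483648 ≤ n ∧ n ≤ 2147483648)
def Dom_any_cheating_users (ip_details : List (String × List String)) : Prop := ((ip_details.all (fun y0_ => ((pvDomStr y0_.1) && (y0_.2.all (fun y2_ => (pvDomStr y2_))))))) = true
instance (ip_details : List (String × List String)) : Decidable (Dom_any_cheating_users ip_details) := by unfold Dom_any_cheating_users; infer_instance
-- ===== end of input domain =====

-- B replaces A's nested pairwise comparison of IP sets by one pass over canonical
-- sorted keys tuple(sorted(set(ips))) with a seen-set (objective: alternative single-pass design).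

-- ===== PORT A =====
def any_cheating_users (ip_details : List (String × List String)) : Bool :=
  if ip_details = [] then false
  else
    let ip_sets : List (PySem.Set String) :=
      ip_details.foldl (fun acc t => acc ++ [PySem.Set.ofList t.2]) []
    (PySem.List.pyRange 0 (ip_sets.length : Int) 1).any (fun i =>
      (PySem.List.pyRange (i + 1) (ip_sets.length : Int) 1).any (fun j =>
        PySem.Set.equal (PySem.List.pyGetD ip_sets i []) (PySem.List.pyGetD ip_sets j [])))

-- ===== PORT B =====
-- canonical key of one user: tuple(sorted(set(user_tuple[1])))
def keyOf (t : String × List String) : List String :=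
  PySem.List.sorted (PySem.Set.ofList t.2) (fun x => x) false

-- the 'for' loop of Source B with its early return
def altLoop (rest : List (String × List String)) (seen : PySem.Set (List String)) : Bool :=
  match rest with
  | [] => false
  | t :: rs =>
    if PySem.Set.contains seen (keyOf t) then true
    else altLoop rs (PySem.Set.add seen (keyOf t))

def any_cheating_users_alt (ip_details : List (String × List String)) : Bool :=
  altLoop ip_details PySem.Set.empty

-- ===== PRECONDITION & SPEC =====
def Spec_any_cheating_users (ip_details : List (String × List String)) (out : Bool) : Prop := out = any_cheating_users_alt ip_details
instance (ip_details : List (String × List String)) (out : Bool) : Decidable (Spec_any_cheating_users ip_details out) := by unfold Spec_any_cheating_users; infer_instance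

-- ===== CLAIM (what is proved, stated in full; the proofs are below) =====
def Claim_equal_any_cheating_users : Prop := ∀ (ip_details : List (String × List String)), Dom_any_cheating_users ip_details → Spec_any_cheating_users ip_details (any_cheating_users ip_details)

-- ===== LEMMAS AND PROOFS =====

-- Python set equality of two users' IP sets coincides with equality of their canonical keys
lemma equal_iff_keyOf_eq (s t : String × List String) :
    PySem.Set.equal (PySem.Set.ofList s.2) (PySem.Set.ofList t.2) = true ↔ keyOf s = keyOf t := by
  constructor
  · intro h
    have hm := (PySem.Set.equal_iff _ _).mp h
    have hperm : (PySem.Set.ofList s.2).Perm (PySem.Set.ofList t.2) :=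
      (List.perm_ext_iff_of_nodup (PySem.Set.nodup_ofList _) (PySem.Set.nodup_ofList _)).mpr hm
    exact PySem.List.sorted_eq_sorted_of_perm _ _ _ (fun a b h => h) hperm
  · intro h
    apply (PySem.Set.equal_iff _ _).mpr
    intro x
    have h1 := PySem.List.sorted_perm (PySem.Set.ofList s.2) (fun x => x) false
    have h2 := PySem.List.sorted_perm (PySem.Set.ofList t.2) (fun x => x) false
    have hst : (PySem.Set.ofList s.2).Perm (PySem.Set.ofList t.2) := by
      refine h1.symm.trans ?_
      rw [show PySem.List.sorted (PySem.Set.ofList s.2) (fun x => x) false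
            = PySem.List.sorted (PySem.Set.ofList t.2) (fun x => x) false from h]
      exact h2
    exact hst.mem_iff

-- B's loop invariant: it reports true iff some key of the tail is already seen or the tail repeats a key
lemma altLoop_iff (l : List (String × List String)) (seen : PySem.Set (List String)) :
    altLoop l seen = true ↔ (∃ u ∈ l, keyOf u ∈ seen) ∨ ¬ (l.map keyOf).Nodup := by
  induction l generalizing seen with
  | nil => simp [altLoop]
  | cons t rs ih =>
    by_cases hc : keyOf t ∈ seen
    · rw [altLoop, if_pos ((PySem.Set.contains_iff _ _).mpr hc)]
      simp only [true_iff]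
      exact Or.inl ⟨t, List.mem_cons_self, hc⟩
    · rw [altLoop, if_neg (fun h => hc ((PySem.Set.contains_iff _ _).mp h)), ih]
      constructor
      · rintro (⟨u, hu, hmem⟩ | hdup)
        · rcases (PySem.Set.mem_add _ _ _).mp hmem with h | h
          · exact Or.inl ⟨u, List.mem_cons_of_mem _ hu, h⟩
          · refine Or.inr (fun hnd => ?_)
            rw [List.map_cons, List.nodup_cons] at hnd
            exact hnd.1 (List.mem_map.mpr ⟨u, hu, h⟩)
        · refine Or.inr (fun hnd => ?_)
          rw [List.map_cons, List.nodup_cons] at hnd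
          exact hdup hnd.2
      · rintro (⟨u, hu, hmem⟩ | hdup)
        · rcases List.mem_cons.mp hu with rfl | hu'
          · exact absurd hmem hc
          · exact Or.inl ⟨u, hu', (PySem.Set.mem_add _ _ _).mpr (Or.inl hmem)⟩
        · by_cases hk : keyOf t ∈ rs.map keyOf
          · rcases List.mem_map.mp hk with ⟨u, hu, hku⟩
            exact Or.inl ⟨u, hu, (PySem.Set.mem_add _ _ _).mpr (Or.inr hku)⟩
          · refine Or.inr (fun hnd => hdup ?_)
            rw [List.map_cons, List.nodup_cons]
            exact ⟨hk, hnd⟩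

lemma alt_iff (l : List (String × List String)) :
    any_cheating_users_alt l = true ↔ ¬ (l.map keyOf).Nodup := by
  rw [any_cheating_users_alt, altLoop_iff]
  simp [PySem.Set.empty]

lemma a_iff (l : List (String × List String)) :
    any_cheating_users l = true ↔ ¬ (l.map keyOf).Nodup := by
  rcases eq_or_ne l [] with rfl | hne
  · simp [any_cheating_users]
  · rw [any_cheating_users, if_neg hne]
    simp only [PySem.List.foldl_append_singleton_eq_map, List.nil_append, List.length_map]
    rw [List.any_eq_true]
    constructor
    · rintro ⟨i, hi, hinner⟩
      rw [List.any_eq_true] at hinner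
      obtain ⟨j, hj, heq⟩ := hinner
      rw [PySem.List.mem_pyRange_one] at hi hj
      have hin : i.toNat < l.length := by omega
      have hjn : j.toNat < l.length := by omega
      have hij : i.toNat < j.toNat := by omega
      rw [PySem.List.pyGetD_eq_getElem _ [] (by omega) (by simp only [List.length_map]; omega),
          PySem.List.pyGetD_eq_getElem _ [] (by omega) (by simp only [List.length_map]; omega)] at heq
      simp only [List.getElem_map] at heq
      have hkeq : keyOf (l[i.toNat]'hin) = keyOf (l[j.toNat]'hjn) :=
        (equal_iff_keyOf_eq _ _).mp heq
      intro hnd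
      rw [List.Nodup, List.pairwise_iff_getElem] at hnd
      exact hnd i.toNat j.toNat (by simpa using hin) (by simpa using hjn) hij
        (by rw [List.getElem_map, List.getElem_map]; exact hkeq)
    · intro hnd
      rw [List.Nodup, List.pairwise_iff_getElem] at hnd
      push Not at hnd
      obtain ⟨i, j, hi, hj, hij, heq⟩ := hnd
      simp only [List.length_map] at hi hj
      have heq' : keyOf (l[i]'hi) = keyOf (l[j]'hj) := by
        rw [List.getElem_map, List.getElem_map] at heq; exact heq
      have hiI : (i : Int) < (l.length : Int) := by exact_mod_cast hi
      have hjI : (j : Int) < (l.length : Int) := by exact_mod_cast hj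
      have hijI : (i : Int) < (j : Int) := by exact_mod_cast hij
      refine ⟨(i : Int), ?_, ?_⟩
      · rw [PySem.List.mem_pyRange_one]
        exact ⟨Int.natCast_nonneg i, by omega⟩
      · rw [List.any_eq_true]
        refine ⟨(j : Int), ?_, ?_⟩
        · rw [PySem.List.mem_pyRange_one]
          exact ⟨by omega, by omega⟩
        · rw [PySem.List.pyGetD_eq_getElem _ [] (by omega) (by simp only [List.length_map]; omega),
              PySem.List.pyGetD_eq_getElem _ [] (by omega) (by simp only [List.length_map]; omega)]
          simp only [List.getElem_map]
          apply (equal_iff_keyOf_eq _ _).mpr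
          simpa using heq'

-- ===== VERDICT (by name: the statement is the Claim_ definition above) =====
theorem any_cheating_users_spec : Claim_equal_any_cheating_users := by
  intro l _
  unfold Spec_any_cheating_users
  have := (a_iff l).trans (alt_iff l).symm
  cases h : any_cheating_users_alt l
  · cases h2 : any_cheating_users l
    · rfl
    · exact absurd (this.mp h2) (by simp [h])
  · exact this.mpr h
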